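-- pv_equiv track=rewrite | github.com/Chenghao-Tan/benchmark | experiment/hare/reproduce.py | _resolve_round_query_budgets
-- ===== SOURCE A (Python) =====
-- def _resolve_round_query_budgets(budget: int, iterations: int) -> list[int]:
--     active_rounds = min(int(iterations), int(budget))
--     if active_rounds < 1:
--         raise ValueError("budget and iterations must allow at least one active round")
--     base_budget = int(budget) // active_rounds
--     remainder = int(budget) % active_rounds
--     return [
--         base_budget + (1 if round_index < remainder else 0)
--         for round_index in range(active_rounds)
--     ]
-- ===== SOURCE B (Python) =====
-- def _resolve_round_query_budgets(budget: int, iterations: int) -> list[int]: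
--     active_rounds = min(int(iterations), int(budget))
--     if active_rounds < 1:
--         raise ValueError("budget and iterations must allow at least one active round")
--     out = []
--     remaining = int(budget)
--     for rounds_left in range(active_rounds, 0, -1):
--         share = -(-remaining // rounds_left)  # ceiling of remaining / rounds_left
--         out.append(share)
--         remaining -= share
--     return out
-- ===== Notes on version B (the rewrite author's own statement) =====
-- stated objective: alternative
-- what changed: Replaces the upfront base/remainder computation with a per-index conditional by a greedy sequential allocator: each round takes the ceiling of remaining budget over rounds left and subtracts it, so no base, remainder or index comparison exists in B.
import Mathlib
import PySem

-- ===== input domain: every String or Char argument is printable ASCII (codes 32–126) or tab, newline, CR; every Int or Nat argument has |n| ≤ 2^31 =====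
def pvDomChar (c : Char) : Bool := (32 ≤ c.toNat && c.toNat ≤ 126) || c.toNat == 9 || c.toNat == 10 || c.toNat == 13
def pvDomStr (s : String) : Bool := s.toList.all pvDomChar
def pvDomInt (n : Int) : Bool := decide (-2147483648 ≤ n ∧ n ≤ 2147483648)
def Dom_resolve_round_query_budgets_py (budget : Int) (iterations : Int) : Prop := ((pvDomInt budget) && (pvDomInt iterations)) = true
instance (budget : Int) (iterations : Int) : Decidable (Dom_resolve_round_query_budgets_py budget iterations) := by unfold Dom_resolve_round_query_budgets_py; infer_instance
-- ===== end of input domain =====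

-- B allocates greedily: each round takes the ceiling of remaining budget over rounds left and subtracts it, instead of precomputing base/remainder and branching per index (objective: alternative).

-- ===== PORT A =====
def resolve_round_query_budgets_py (budget : Int) (iterations : Int) : List Int :=
  let active_rounds := min iterations budget
  -- Pre_ excludes active_rounds < 1 (Python raises ValueError there)
  let base_budget := PySem.Int.floordiv budget active_rounds
  let remainder := PySem.Int.mod budget active_rounds
  (PySem.List.pyRange 0 active_rounds 1).map
    (fun round_index => base_budget + (if round_index < remainder then 1 else 0))

-- ===== PORT B =====
-- the loop 'for rounds_left in range(active_rounds, 0, -1)' as structural recursion on rounds_left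
def pvGreedyAlloc (remaining : Int) : Nat → List Int
  | 0 => []
  | r + 1 =>
    let share := -(PySem.Int.floordiv (-remaining) ((r : Int) + 1))  -- -(-remaining // rounds_left)
    share :: pvGreedyAlloc (remaining - share) r

def resolve_round_query_budgets_py_alt (budget : Int) (iterations : Int) : List Int :=
  let active_rounds := min iterations budget
  pvGreedyAlloc budget active_rounds.toNat

-- ===== PRECONDITION & SPEC =====
-- Pre_ excludes exactly the inputs where A raises ValueError (min(iterations, budget) < 1).
def Pre_resolve_round_query_budgets_py (budget : Int) (iterations : Int) : Prop :=
  1 ≤ min iterations budget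
instance (budget : Int) (iterations : Int) : Decidable (Pre_resolve_round_query_budgets_py budget iterations) := by unfold Pre_resolve_round_query_budgets_py; infer_instance

def pvWitness_resolve_round_query_budgets_py : Int × Int := (7, 3)

def Spec_resolve_round_query_budgets_py (budget : Int) (iterations : Int) (out : List Int) : Prop := out = resolve_round_query_budgets_py_alt budget iterations
instance (budget : Int) (iterations : Int) (out : List Int) : Decidable (Spec_resolve_round_query_budgets_py budget iterations out) := by unfold Spec_resolve_round_query_budgets_py; infer_instance

-- ===== CLAIM (what is proved, stated in full; the proofs are below) =====
def Claim_equal_resolve_round_query_budgets_py : Prop := ∀ (budget : Int) (iterations : Int), Dom_resolve_round_query_budgets_py budget iterations → Pre_resolve_round_query_budgets_py budget iterations → Spec_resolve_round_query_budgets_py budget iterations (resolve_round_query_budgets_py budget iterations)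

-- ===== LEMMAS AND PROOFS =====

-- A's comprehension as two uniform blocks
theorem map_ite_blocks (n r base : Int) (h0 : 0 ≤ r) (hr : r ≤ n) :
    (PySem.List.pyRange 0 n 1).map (fun i => base + (if i < r then 1 else 0))
      = List.replicate r.toNat (base + 1) ++ List.replicate (n - r).toNat base := by
  rw [PySem.List.pyRange_one_append 0 r n h0 hr, List.map_append]
  congr 1
  · rw [List.map_congr_left (g := fun _ => base + 1)
      (fun i hi => by
        have := (PySem.List.mem_pyRange_one).1 hi
        simp [show i < r by omega])]
    simp [List.map_const']
  · rw [List.map_congr_left (g := fun _ => base)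
      (fun i hi => by
        have := (PySem.List.mem_pyRange_one).1 hi
        simp [show ¬ i < r by omega])]
    simp [List.map_const']

-- B's greedy recursion also yields the two uniform blocks
theorem pvGreedyAlloc_succ (b : Int) (r : Nat) :
    pvGreedyAlloc b (r + 1)
      = -(PySem.Int.floordiv (-b) ((r : Int) + 1))
        :: pvGreedyAlloc (b - -(PySem.Int.floordiv (-b) ((r : Int) + 1))) r := rfl

theorem greedy_blocks : ∀ (r : Nat) (b : Int),
    pvGreedyAlloc b (r + 1)
      = List.replicate (PySem.Int.mod b ((r : Int) + 1)).toNat (PySem.Int.floordiv b ((r : Int) + 1) + 1)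
        ++ List.replicate ((r + 1) - (PySem.Int.mod b ((r : Int) + 1)).toNat) (PySem.Int.floordiv b ((r : Int) + 1)) := by
  intro r
  induction r with
  | zero =>
    intro b
    simp [pvGreedyAlloc, PySem.Int.floordiv, PySem.Int.mod]
  | succ r ih =>
    intro b
    rw [pvGreedyAlloc_succ b (r + 1)]
    push_cast
    set n : Int := (r : Int) + 2 with hn
    have hn' : (r : Int) + 1 + 1 = n := by rw [hn]; ring
    rw [hn']
    have hnpos : 0 < n := by omega
    set q := PySem.Int.floordiv b n with hq
    set s := PySem.Int.mod b n with hs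
    have hdecomp : q * n + s = b := PySem.Int.floordiv_mul_add_mod b n
    have hs0 : 0 ≤ s := PySem.Int.mod_nonneg b hnpos
    have hslt : s < n := PySem.Int.mod_lt b hnpos
    by_cases hz : s = 0
    · -- exact division: every round gets q
      have hshare : -(PySem.Int.floordiv (-b) n) = q := by
        rw [PySem.Int.neg_floordiv_neg_eq_iff_of_pos hnpos]
        constructor
        · nlinarith
        · nlinarith
      have hb' : b - q = q * ((r : Int) + 1) := by nlinarith
      have hfd : PySem.Int.floordiv (q * ((r : Int) + 1)) ((r : Int) + 1) = q := by
        rw [PySem.Int.floordiv_eq_ediv_of_pos (show (0:Int) < (r : Int) + 1 by omega)]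
        exact Int.mul_ediv_cancel q (by omega)
      have hmd : PySem.Int.mod (q * ((r : Int) + 1)) ((r : Int) + 1) = 0 := by
        rw [PySem.Int.mod_eq_emod_of_pos (show (0:Int) < (r : Int) + 1 by omega)]
        exact Int.mul_emod_left q _
      rw [hshare, hb', ih, hfd, hmd]
      simp [hz, List.replicate_succ]
    · -- remainder left: this round gets q + 1
      have hs1 : 1 ≤ s := by omega
      have hshare : -(PySem.Int.floordiv (-b) n) = q + 1 := by
        rw [PySem.Int.neg_floordiv_neg_eq_iff_of_pos hnpos]
        constructor
        · nlinarith
        · nlinarith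
      have hb' : b - (q + 1) = (s - 1) + q * ((r : Int) + 1) := by nlinarith
      have hfd : PySem.Int.floordiv ((s - 1) + q * ((r : Int) + 1)) ((r : Int) + 1) = q := by
        rw [PySem.Int.floordiv_eq_ediv_of_pos (show (0:Int) < (r : Int) + 1 by omega)]
        rw [Int.add_mul_ediv_right _ _ (show ((r : Int) + 1) ≠ 0 by omega)]
        rw [Int.ediv_eq_zero_of_lt (by omega) (by omega)]
        omega
      have hmd : PySem.Int.mod ((s - 1) + q * ((r : Int) + 1)) ((r : Int) + 1) = s - 1 := by
        rw [PySem.Int.mod_eq_emod_of_pos (show (0:Int) < (r : Int) + 1 by omega)]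
        rw [Int.add_mul_emod_self_right]
        exact Int.emod_eq_of_lt (by omega) (by omega)
      rw [hshare, hb', ih, hfd, hmd]
      have h1 : s.toNat = (s - 1).toNat + 1 := by omega
      rw [h1, List.replicate_succ,
        show (r + 1 + 1) - ((s - 1).toNat + 1) = (r + 1) - (s - 1).toNat from by omega]
      simp

-- ===== VERDICT (by name: the statement is the Claim_ definition above) =====
theorem resolve_round_query_budgets_py_spec : Claim_equal_resolve_round_query_budgets_py := by
  intro budget iterations _ hpre
  unfold Pre_resolve_round_query_budgets_py at hpre
  unfold Spec_resolve_round_query_budgets_py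
  unfold resolve_round_query_budgets_py resolve_round_query_budgets_py_alt
  simp only []
  set a := min iterations budget with ha
  have hapos : 0 < a := by omega
  have h0 : 0 ≤ PySem.Int.mod budget a := PySem.Int.mod_nonneg budget hapos
  have hlt : PySem.Int.mod budget a < a := PySem.Int.mod_lt budget hapos
  obtain ⟨r, hr⟩ : ∃ r : Nat, a.toNat = r + 1 := ⟨a.toNat - 1, by omega⟩
  rw [map_ite_blocks a (PySem.Int.mod budget a) (PySem.Int.floordiv budget a) h0 (le_of_lt hlt)]
  rw [hr, greedy_blocks r budget]
  have hcast : ((r : Int) + 1) = a := by omega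
  rw [hcast]
  have hcnt : (a - PySem.Int.mod budget a).toNat = (r + 1) - (PySem.Int.mod budget a).toNat := by
    omega
  rw [hcnt]
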